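-- pv_equiv track=rewrite | github.com/tlitre/PredictingGlassdoor | scripts/tests.py | bag_words
-- ===== SOURCE A (Python) =====
-- def bag_words(data):
--     bag = {}
--     word_count = 0
--     for row in data['Description']:
--         for word in row:
--             if word not in bag:
--                 bag[word] = word_count
--                 word_count += 1
--
--     return bag
-- ===== SOURCE B (Python) =====
-- def bag_words(data):
--     flat = [w for row in data['Description'] for w in row]
--     first = {}
--     for pos, w in reversed(list(enumerate(flat))):
--         first[w] = pos          # last write (smallest pos) wins: first occurrence position
--     order = sorted(first, key=lambda w: first[w])
--     return {w: i for i, w in enumerate(order)}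
-- ===== Notes on version B (the rewrite author's own statement) =====
-- stated objective: alternative
-- what changed: Instead of A's single forward pass with a membership test and a running counter, B records each word's first-occurrence position via a reverse overwrite pass (no membership test, no counter) and then derives the indices by sorting the words on that position and enumerating the sorted order.
-- outside the precondition, e.g. on bag_words({'Other': [['a']]}): A raises KeyError, B raises KeyError
import Mathlib
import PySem

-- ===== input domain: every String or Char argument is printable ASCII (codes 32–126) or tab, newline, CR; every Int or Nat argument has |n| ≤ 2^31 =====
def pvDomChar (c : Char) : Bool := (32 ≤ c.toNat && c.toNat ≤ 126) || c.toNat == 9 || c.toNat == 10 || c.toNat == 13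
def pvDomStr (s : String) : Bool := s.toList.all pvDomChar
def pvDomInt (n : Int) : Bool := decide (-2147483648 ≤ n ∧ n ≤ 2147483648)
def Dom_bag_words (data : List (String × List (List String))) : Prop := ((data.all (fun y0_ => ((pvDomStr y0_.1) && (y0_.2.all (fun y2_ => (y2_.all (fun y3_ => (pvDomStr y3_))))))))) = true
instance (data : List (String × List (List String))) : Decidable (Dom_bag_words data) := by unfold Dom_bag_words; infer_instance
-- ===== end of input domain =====

-- B replaces A's interleaved membership-test + counter pass by: a reverse overwrite pass recording each word's
-- first-occurrence position, then ranking the words by sorting on that position (objective: alternative).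


-- ===== PORT A =====
-- one step of A's inner loop: 'if word not in bag: bag[word] = word_count; word_count += 1'
def bagStep (st : PySem.Dict String Int × Int) (w : String) : PySem.Dict String Int × Int :=
  if st.1.contains w then st else (st.1.insert w st.2, st.2 + 1)

def bag_words (data : List (String × List (List String))) : List (String × Int) :=
  match (PySem.Dict.mk data).get? "Description" with
  | none => []   -- Python raises KeyError here; excluded by Pre_
  | some rows =>
      ((rows.foldl (fun st row => row.foldl bagStep st) (PySem.Dict.empty, 0)).1).items

-- ===== PORT B =====
def bag_words_alt (data : List (String × List (List String))) : List (String × Int) :=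
  match (PySem.Dict.mk data).get? "Description" with
  | none => []   -- Python raises KeyError here; excluded by Pre_
  | some rows =>
      let flat := rows.flatMap (fun r => r)
      -- 'for pos, w in reversed(list(enumerate(flat))): first[w] = pos'
      let first := ((PySem.List.enumerate flat).reverse).foldl
        (fun d p => d.insert p.2 p.1) (PySem.Dict.empty : PySem.Dict String Int)
      -- 'sorted(first, key=lambda w: first[w])'; every sorted element is a key of first, so getD is exact for first[w]
      let order := PySem.List.sorted first.keys (fun w => first.getD w 0)
      (PySem.List.enumerate order).map (fun p => (p.2, p.1))

-- ===== PRECONDITION & SPEC =====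
-- Pre_ excludes exactly the inputs without a 'Description' key, where A raises KeyError (B raises too).
def Pre_bag_words (data : List (String × List (List String))) : Prop :=
  ((PySem.Dict.mk data).get? "Description").isSome = true
instance (data : List (String × List (List String))) : Decidable (Pre_bag_words data) := by
  unfold Pre_bag_words; infer_instance

def pvWitness_bag_words : (List (String × List (List String))) :=
  [("Description", [["to", "be"], ["or", "not", "to", "be"]])]

def Spec_bag_words (data : List (String × List (List String))) (out : List (String × Int)) : Prop := out = bag_words_alt data
instance (data : List (String × List (List String))) (out : List (String × Int)) : Decidable (Spec_bag_words data out) := by unfold Spec_bag_words; infer_instance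

-- ===== CLAIM (what is proved, stated in full; the proofs are below) =====
def Claim_equal_bag_words : Prop := ∀ (data : List (String × List (List String))), Dom_bag_words data → Pre_bag_words data → Spec_bag_words data (bag_words data)

-- ===== LEMMAS AND PROOFS =====

-- ---------- A side: the dict A has built after seeing exactly the distinct words s (in order), counter s.length
def dictOf (s : List String) : PySem.Dict String Int :=
  PySem.Dict.mk ((PySem.List.enumerate s).map (fun p => (p.2, p.1)))

lemma enumerate_append_singleton {α : Type} (s : List α) (w : α) (start : Int) :
    PySem.List.enumerate (s ++ [w]) start
      = PySem.List.enumerate s start ++ [(start + s.length, w)] := by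
  induction s generalizing start with
  | nil => simp [PySem.List.enumerate_nil, PySem.List.enumerate_cons]
  | cons x t ih =>
      simp [PySem.List.enumerate_cons, ih]
      ring_nf

lemma contains_map_enumerate (s : List String) (w : String) (start : Int) :
    (((PySem.List.enumerate s start).map (fun p => (p.2, p.1))).any (fun p => p.1 == w))
      = s.contains w := by
  induction s generalizing start with
  | nil => simp [PySem.List.enumerate_nil]
  | cons x t ih =>
      simp only [PySem.List.enumerate_cons, List.map_cons, List.any_cons, ih]
      congr 1
      by_cases hx : x = w
      · subst hx; simp
      · simp [hx, Ne.symm hx]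

lemma dictOf_contains (s : List String) (w : String) :
    (dictOf s).contains w = s.contains w := by
  simpa [dictOf, PySem.Dict.contains] using contains_map_enumerate s w 0

lemma dictOf_insert (s : List String) (w : String) (h : s.contains w = false) :
    (dictOf s).insert w (s.length : Int) = dictOf (s ++ [w]) := by
  have hc : (dictOf s).contains w = false := by rw [dictOf_contains]; exact h
  simp only [PySem.Dict.insert, hc, Bool.false_eq_true, if_false]
  simp [dictOf, enumerate_append_singleton]

-- A's flat loop over any word list, started in the state reached after the distinct words s,
-- extends s exactly as Set.add does (with the matching counter).
lemma loop_inv (ws : List String) (s : List String) :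
    ws.foldl bagStep (dictOf s, (s.length : Int))
      = (dictOf (ws.foldl PySem.Set.add s), ((ws.foldl PySem.Set.add s).length : Int)) := by
  induction ws generalizing s with
  | nil => simp
  | cons w t ih =>
      by_cases h : s.contains w = true
      · have hmem : w ∈ s := by simpa using h
        have hstep : bagStep (dictOf s, (s.length : Int)) w = (dictOf s, (s.length : Int)) := by
          simp [bagStep, dictOf_contains, hmem]
        have hadd : PySem.Set.add s w = s := by
          simp [PySem.Set.add, PySem.Set.contains, hmem]
        simp only [List.foldl_cons, hstep, hadd]
        exact ih s
      · have hmem : w ∉ s := by simpa using h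
        have hstep : bagStep (dictOf s, (s.length : Int)) w
            = (dictOf (s ++ [w]), ((s ++ [w]).length : Int)) := by
          simp only [bagStep, dictOf_contains]
          rw [if_neg h, dictOf_insert s w (by simpa using hmem)]
          rw [Prod.mk.injEq]
          refine ⟨rfl, ?_⟩
          simp only [List.length_append, List.length_cons, List.length_nil]
          push_cast
          ring
        have hadd : PySem.Set.add s w = s ++ [w] := by
          simp [PySem.Set.add, PySem.Set.contains, hmem]
        simp only [List.foldl_cons, hstep, hadd]
        exact ih (s ++ [w])

-- ---------- B side
-- the ordered distinct words are strictly increasing in first-occurrence position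
lemma pairwise_idxOf (xs : List String) :
    (PySem.Set.ofList xs).Pairwise (fun a b => xs.idxOf a < xs.idxOf b) := by
  induction xs with
  | nil => simp [PySem.Set.ofList_nil]
  | cons x t ih =>
      rw [PySem.Set.ofList_cons]
      constructor
      · intro b hb
        have hbx : b ≠ x := ((PySem.Set.mem_discard _ _ _).1 hb).2
        rw [List.idxOf_cons_self, List.idxOf_cons_ne t hbx.symm]
        exact Nat.succ_pos _
      · have hsub : (PySem.Set.discard (PySem.Set.ofList t) x).Sublist (PySem.Set.ofList t) := by
          show ((PySem.Set.ofList t).filter _).Sublist (PySem.Set.ofList t)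
          exact List.filter_sublist
        have hp := ih.sublist hsub
        refine hp.imp_of_mem ?_
        intro a b ha hb hab
        have hax : a ≠ x := ((PySem.Set.mem_discard _ _ _).1 ha).2
        have hbx : b ≠ x := ((PySem.Set.mem_discard _ _ _).1 hb).2
        rw [List.idxOf_cons_ne t hax.symm, List.idxOf_cons_ne t hbx.symm]
        exact Nat.succ_lt_succ hab

-- find? over an enumeration locates the first occurrence
lemma find?_enumerate (xs : List String) (s : Int) (w : String) (h : w ∈ xs) :
    (PySem.List.enumerate xs s).find? (fun p => p.2 == w)
      = some (s + (xs.idxOf w : Int), w) := by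
  induction xs generalizing s with
  | nil => cases h
  | cons x t ih =>
      rw [PySem.List.enumerate_cons]
      by_cases hx : x = w
      · subst hx
        simp
      · have hmem : w ∈ t := by cases List.mem_cons.1 h with
          | inl h' => exact absurd h'.symm hx
          | inr h' => exact h'
        rw [List.find?_cons_of_neg (by simpa using hx), ih (s + 1) hmem,
            List.idxOf_cons_ne t hx]
        congr 1
        rw [Prod.mk.injEq]
        refine ⟨?_, rfl⟩
        push_cast
        ring
-- lookup in the dict built by the reverse overwrite pass = value of the FIRST matching pair
lemma foldl_insert_rev_get? (ps : List (Int × String)) (d : PySem.Dict String Int) (w : String) :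
    ((ps.reverse).foldl (fun d p => d.insert p.2 p.1) d).get? w
      = (match ps.find? (fun p => p.2 == w) with
         | some p => some p.1
         | none => d.get? w) := by
  induction ps generalizing d with
  | nil => simp
  | cons p t ih =>
      rw [List.reverse_cons, List.foldl_append]
      simp only [List.foldl_cons, List.foldl_nil]
      rw [PySem.Dict.get?_insert]
      by_cases hw : w = p.2
      · subst hw
        simp
      · rw [if_neg hw, ih d, List.find?_cons_of_neg (by simpa using fun h => hw h.symm)]

-- ===== VERDICT (by name: the statement is the Claim_ definition above) =====
theorem bag_words_spec : Claim_equal_bag_words := by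
  intro data _ hpre
  unfold Spec_bag_words bag_words bag_words_alt
  cases hg : (PySem.Dict.mk data).get? "Description" with
  | none => exact absurd hpre (by simp [Pre_bag_words, hg])
  | some rows =>
      simp only []
      -- names for B's intermediate values
      set flat := rows.flatMap (fun r => r) with hflatdef
      set first := ((PySem.List.enumerate flat).reverse).foldl
        (fun d p => d.insert p.2 p.1) (PySem.Dict.empty : PySem.Dict String Int) with hfirst
      have hflatten : flat = rows.flatten := List.flatMap_id'
      -- B's lookup: first.getD w 0 is w's first-occurrence index, for w occurring in flat
      have hkey : ∀ w ∈ PySem.Set.ofList flat, first.getD w 0 = (flat.idxOf w : Int) := by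
        intro w hw
        have hwf : w ∈ flat := (PySem.Set.mem_ofList _ _).1 hw
        rw [hfirst, PySem.Dict.getD_eq_get?_getD, foldl_insert_rev_get?,
            find?_enumerate flat 0 w hwf]
        simp
      -- B's key list is a permutation of the ordered distinct words
      have hkeys : first.keys = PySem.Set.ofList flat.reverse := by
        have hk : first.keys = PySem.Set.update
            (PySem.Dict.empty : PySem.Dict String Int).keys
            (((PySem.List.enumerate flat).reverse).map (fun p => p.2)) :=
          PySem.Dict.keys_foldl_insert_key ((PySem.List.enumerate flat).reverse)
            (fun (p : Int × String) => p.2) (fun _ (p : Int × String) => p.1) PySem.Dict.empty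
        rw [hk, show (PySem.Dict.empty : PySem.Dict String Int).keys = [] from rfl,
            PySem.Set.update_nil_left, List.map_reverse, PySem.List.map_snd_enumerate]
      have hperm : (PySem.Set.ofList flat).Perm first.keys := by
        rw [hkeys]
        refine (List.perm_ext_iff_of_nodup (PySem.Set.nodup_ofList _) (PySem.Set.nodup_ofList _)).2 ?_
        intro a
        rw [PySem.Set.mem_ofList, PySem.Set.mem_ofList, List.mem_reverse]
      -- the ordered distinct words are strictly increasing under B's sort key
      have hpair : (PySem.Set.ofList flat).Pairwise
          (fun a b => first.getD a 0 < first.getD b 0) := by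
        refine (pairwise_idxOf flat).imp_of_mem ?_
        intro a b ha hb hab
        rw [hkey a ha, hkey b hb]
        exact_mod_cast hab
      have horder : PySem.List.sorted first.keys (fun w => first.getD w 0)
          = PySem.Set.ofList flat :=
        PySem.List.sorted_eq_of_perm_of_pairwise_lt _ _ _ hperm hpair
      rw [horder]
      -- A's side: the loop builds exactly the dict of the ordered distinct words
      have hflat : rows.foldl (fun st row => row.foldl bagStep st) (PySem.Dict.empty, 0)
          = rows.flatten.foldl bagStep (PySem.Dict.empty, 0) := (List.foldl_flatten).symm
      have h0 : (PySem.Dict.empty : PySem.Dict String Int) = dictOf [] := rfl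
      rw [hflat, h0, show ((0 : Int)) = (([] : List String).length : Int) by simp,
          loop_inv rows.flatten []]
      rw [show rows.flatten.foldl PySem.Set.add [] = PySem.Set.ofList rows.flatten from
            (PySem.Set.ofList_eq_foldl _).symm, ← hflatten]
      rfl
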